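-- pv_equiv track=rewrite | github.com/shou-watanabe/Atcoder | ABC242/c/main.py | rec
-- ===== SOURCE A (Python) =====
-- def rec(n):
--     if n == 1:
--         return [1 for _ in range(9)]
--     arr = rec(n - 1)
--     arr2 = [1 for _ in range(9)]
--     arr2[0] = arr[0] + arr[1]
--     arr2[1] = arr[0] + arr[1] + arr[2]
--     arr2[2] = arr[1] + arr[2] + arr[3]
--     arr2[3] = arr[2] + arr[3] + arr[4]
--     arr2[4] = arr[3] + arr[4] + arr[5]
--     arr2[5] = arr[4] + arr[5] + arr[6]
--     arr2[6] = arr[5] + arr[6] + arr[7]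
--     arr2[7] = arr[6] + arr[7] + arr[8]
--     arr2[8] = arr[7] + arr[8]
--     return arr2
-- ===== SOURCE B (Python) =====
-- def rec(n):
--     arr = [1] * 9
--     for _ in range(n - 1):
--         arr = [sum(arr[e] for e in (d - 1, d, d + 1) if 0 <= e <= 8)
--                for d in range(9)]
--     return arr
-- ===== Notes on version B (the rewrite author's own statement) =====
-- stated objective: simpler
-- what changed: Replaced the recursion with nine hardcoded assignment lines by an iterative loop that builds each new row with a single neighbor-sum comprehension.
import Mathlib
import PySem

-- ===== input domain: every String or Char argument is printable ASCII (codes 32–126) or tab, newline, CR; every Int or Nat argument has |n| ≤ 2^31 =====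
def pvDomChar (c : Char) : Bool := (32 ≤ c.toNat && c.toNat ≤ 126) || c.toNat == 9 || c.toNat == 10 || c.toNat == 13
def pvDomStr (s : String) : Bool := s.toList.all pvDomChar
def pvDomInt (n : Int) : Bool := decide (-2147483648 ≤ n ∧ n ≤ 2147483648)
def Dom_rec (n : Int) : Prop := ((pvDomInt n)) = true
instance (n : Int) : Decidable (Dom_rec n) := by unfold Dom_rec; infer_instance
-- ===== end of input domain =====

-- B replaces A's recursion with nine hardcoded assignment lines by an iterative
-- neighbor-sum loop (objective: simpler); A and B return the same list for every n ≥ 1.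


-- ===== PORT A =====
-- A's recursion descends n → n-1 until the base case n = 1; on Pre_rec (n ≥ 1) the
-- recursion depth is n-1, so it is transcribed as structural recursion on (n-1).toNat.
-- All indices into arr/arr2 are in range (both lists have length 9), so List.getD/set
-- is exact for Python's arr[i] / arr2[i] = … here.
def recNatA : Nat → List Int
  | 0 => List.replicate 9 (1 : Int)          -- if n == 1: return [1 for _ in range(9)]
  | k + 1 =>
    let arr := recNatA k                     -- arr = rec(n - 1)
    let arr2 := List.replicate 9 (1 : Int)   -- arr2 = [1 for _ in range(9)]
    let arr2 := arr2.set 0 (arr.getD 0 0 + arr.getD 1 0)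
    let arr2 := arr2.set 1 (arr.getD 0 0 + arr.getD 1 0 + arr.getD 2 0)
    let arr2 := arr2.set 2 (arr.getD 1 0 + arr.getD 2 0 + arr.getD 3 0)
    let arr2 := arr2.set 3 (arr.getD 2 0 + arr.getD 3 0 + arr.getD 4 0)
    let arr2 := arr2.set 4 (arr.getD 3 0 + arr.getD 4 0 + arr.getD 5 0)
    let arr2 := arr2.set 5 (arr.getD 4 0 + arr.getD 5 0 + arr.getD 6 0)
    let arr2 := arr2.set 6 (arr.getD 5 0 + arr.getD 6 0 + arr.getD 7 0)
    let arr2 := arr2.set 7 (arr.getD 6 0 + arr.getD 7 0 + arr.getD 8 0)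
    let arr2 := arr2.set 8 (arr.getD 7 0 + arr.getD 8 0)
    arr2

def rec (n : Int) : List Int := recNatA (n - 1).toNat

-- ===== PORT B =====
-- one row update: [sum(arr[e] for e in (d-1, d, d+1) if 0 <= e <= 8) for d in range(9)]
def recAltStep (arr : List Int) : List Int :=
  (List.range 9).map (fun d =>
    (([(d : Int) - 1, (d : Int), (d : Int) + 1].filter
        (fun e => decide (0 ≤ e ∧ e ≤ 8))).foldl
      (fun s e => s + arr.getD e.toNat 0) 0))

-- for _ in range(n - 1): arr = recAltStep arr
def recAltLoop : Nat → List Int → List Int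
  | 0, arr => arr
  | k + 1, arr => recAltLoop k (recAltStep arr)

def rec_alt (n : Int) : List Int := recAltLoop (n - 1).toNat (List.replicate 9 (1 : Int))

-- ===== PRECONDITION & SPEC =====
-- Pre_rec: A's recursion only terminates for n ≥ 1; for n ≤ 0 it raises RecursionError.
def Pre_rec (n : Int) : Prop := 1 ≤ n
instance (n : Int) : Decidable (Pre_rec n) := by unfold Pre_rec; infer_instance
def pvWitness_rec : Int := (3)

def Spec_rec (n : Int) (out : List Int) : Prop := out = rec_alt n
instance (n : Int) (out : List Int) : Decidable (Spec_rec n out) := by unfold Spec_rec; infer_instance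

-- ===== CLAIM (what is proved, stated in full; the proofs are below) =====
def Claim_equal_rec : Prop := ∀ (n : Int), Dom_rec n → Pre_rec n → Spec_rec n (rec n)

-- ===== LEMMAS AND PROOFS =====
theorem recNatA_length (k : Nat) : (recNatA k).length = 9 := by
  cases k <;> simp [recNatA]

theorem recStep_eq_alt (arr : List Int) (h : arr.length = 9) :
    recAltStep arr =
      (let arr2 := List.replicate 9 (1 : Int)
       let arr2 := arr2.set 0 (arr.getD 0 0 + arr.getD 1 0)
       let arr2 := arr2.set 1 (arr.getD 0 0 + arr.getD 1 0 + arr.getD 2 0)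
       let arr2 := arr2.set 2 (arr.getD 1 0 + arr.getD 2 0 + arr.getD 3 0)
       let arr2 := arr2.set 3 (arr.getD 2 0 + arr.getD 3 0 + arr.getD 4 0)
       let arr2 := arr2.set 4 (arr.getD 3 0 + arr.getD 4 0 + arr.getD 5 0)
       let arr2 := arr2.set 5 (arr.getD 4 0 + arr.getD 5 0 + arr.getD 6 0)
       let arr2 := arr2.set 6 (arr.getD 5 0 + arr.getD 6 0 + arr.getD 7 0)
       let arr2 := arr2.set 7 (arr.getD 6 0 + arr.getD 7 0 + arr.getD 8 0)
       let arr2 := arr2.set 8 (arr.getD 7 0 + arr.getD 8 0)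
       arr2) := by
  match arr, h with
  | [a, b, c, d, e, f, g, h', i], _ =>
    simp [recAltStep, List.range_succ]

theorem recAltLoop_succ (k : Nat) (arr : List Int) :
    recAltLoop k (recAltStep arr) = recAltStep (recAltLoop k arr) := by
  induction k generalizing arr with
  | zero => rfl
  | succ k ih => simpa [recAltLoop] using ih (recAltStep arr)

theorem recNatA_eq_loop (k : Nat) :
    recNatA k = recAltLoop k (List.replicate 9 1) := by
  induction k with
  | zero => rfl
  | succ k ih =>
    have h := recStep_eq_alt (recNatA k) (recNatA_length k)
    calc recNatA (k + 1) = recAltStep (recNatA k) := by rw [h]; rfl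
    _ = recAltStep (recAltLoop k (List.replicate 9 1)) := by rw [ih]
    _ = recAltLoop (k + 1) (List.replicate 9 1) := by
          rw [recAltLoop, recAltLoop_succ]

theorem rec_spec : Claim_equal_rec := by
  intro n _ _
  unfold Spec_rec rec rec_alt
  exact recNatA_eq_loop _
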